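-- pv_equiv track=rewrite | github.com/keongmini/Algorithm_Study | programmers/140108.py | solution
-- ===== SOURCE A (Python) =====
-- def solution(s):
--     result = 0
--
--     o = 0
--     x = 0
--
--     now = s[0]
--
--     for i in range(len(s)):
--         char = s[i]
--
--         if char == now:
--             o += 1
--         else:
--             x += 1
--
--         if o == x:
--             result += 1
--             o = 0
--             x = 0
--             if i < len(s) - 1:
--                 now = s[i + 1]
--
--     if o > 0 or x > 0:
--         return result + 1
--
--     return result
-- ===== SOURCE B (Python) =====
-- def solution(s):
--     first = s[0]  # raises IndexError on empty input, like A
--     # stage 1: map each char to +1 (matches group leader) / -1 (differs)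
--     sums = [1 if c == first else -1 for c in s]
--     # stage 2: in-place prefix sums
--     for i in range(1, len(sums)):
--         sums[i] += sums[i - 1]
--     # stage 3: the first zero prefix sum ends the first group
--     if 0 not in sums:
--         return 1
--     cut = sums.index(0) + 1
--     rest = s[cut:]
--     return 1 + (solution(rest) if rest else 0)
-- ===== Notes on version B (the rewrite author's own statement) =====
-- stated objective: alternative
-- what changed: A is a single flat index loop maintaining two counters o/x and a lookahead reset of the group character plus a leftover check; B is recursive with staged passes per group: map the string to +1/-1 against its first character, take in-place prefix sums, locate the first zero with list membership and .index to cut off the first group, slice and recurse on the remainder. Pre_ excludes only the empty string, on which both raise IndexError.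
import Mathlib
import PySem

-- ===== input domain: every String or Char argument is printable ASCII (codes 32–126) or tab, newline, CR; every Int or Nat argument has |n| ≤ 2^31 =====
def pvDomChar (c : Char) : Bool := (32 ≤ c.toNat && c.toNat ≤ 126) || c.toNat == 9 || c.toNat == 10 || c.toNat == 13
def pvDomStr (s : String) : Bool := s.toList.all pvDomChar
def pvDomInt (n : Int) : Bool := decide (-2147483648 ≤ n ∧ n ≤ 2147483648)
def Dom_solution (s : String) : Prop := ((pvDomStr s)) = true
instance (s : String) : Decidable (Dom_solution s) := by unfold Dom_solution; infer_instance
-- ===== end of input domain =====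

-- B replaces A's flat two-counter loop with recursion over groups: per call it maps
-- the string to ±1 against its first character, takes prefix sums, cuts at the first
-- zero via list index lookup, and recurses on the slice (alternative decomposition).


-- ===== PORT A =====
-- A's index loop 'for i in range(len(s))' reads s[i] and (at a group boundary) s[i+1];
-- it is transcribed as structural recursion over the character list, where s[i+1] is
-- the head of the remaining list: the same state (result, o, x, now) and the same tests.
def solutionA_loop (result o x : Int) (now : Char) : List Char → Int
  | [] => if o > 0 ∨ x > 0 then result + 1 else result
  | c :: rest =>
    let o' := if c == now then o + 1 else o
    let x' := if c == now then x else x + 1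
    if o' == x' then
      let now' := match rest with | [] => now | d :: _ => d
      solutionA_loop (result + 1) 0 0 now' rest
    else
      solutionA_loop result o' x' now rest

def solution (s : String) : Int :=
  match s.toList with
  | [] => 0  -- unreachable: Python indexes the first char of an empty string (IndexError), excluded by Pre_
  | c :: rest => solutionA_loop 0 0 0 c (c :: rest)

-- ===== PORT B =====
-- stage 2 of Source B: the in-place prefix-sum pass 'for i in range(1,len): sums[i] += sums[i-1]',
-- transcribed as a recursion carrying the running sum (the same list of values)
def solutionB_prefix (t : Int) : List Int → List Int
  | [] => []
  | d :: ds => (t + d) :: solutionB_prefix (t + d) ds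

-- Source B's recursion over the string, on List Char (s[cut:] is List.drop, cut ≥ 0)
def solutionB_go : List Char → Int
  | [] => 0  -- unreachable: Source B indexes s[0] first; the empty string is excluded by Pre_
  | c :: rest =>
    let sums := solutionB_prefix 0 ((c :: rest).map (fun d => if d == c then 1 else -1))
    match PySem.List.index? sums 0 with
    | none => 1
    | some idx =>
      let tail := (c :: rest).drop (idx + 1)
      1 + (if tail.isEmpty then 0 else solutionB_go tail)
termination_by l => l.length
decreasing_by simp [List.length_drop]

def solution_alt (s : String) : Int := solutionB_go s.toList

-- ===== PRECONDITION & SPEC =====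
-- Pre_ excludes exactly the empty string, on which both A and B raise IndexError
-- (both index the first character before anything else).
def Pre_solution (s : String) : Prop := s ≠ ""
instance (s : String) : Decidable (Pre_solution s) := by unfold Pre_solution; infer_instance
def pvWitness_solution : String := "aabbac"

def Spec_solution (s : String) (out : Int) : Prop := out = solution_alt s
instance (s : String) (out : Int) : Decidable (Spec_solution s out) := by unfold Spec_solution; infer_instance

-- ===== CLAIM (what is proved, stated in full; the proofs are below) =====
def Claim_equal_solution : Prop := ∀ (s : String), Dom_solution s → Pre_solution s → Spec_solution s (solution s)

-- ===== LEMMAS AND PROOFS =====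

-- proof-side helper: a fused scan returning the suffix after the shortest balanced
-- prefix (none if the whole list is unbalanced); bridges the two ports
def pScan (now : Char) (bal : Int) : List Char → Option (List Char)
  | [] => none
  | c :: rest =>
    let bal' := if c == now then bal + 1 else bal - 1
    if bal' == 0 then some rest else pScan now bal' rest

lemma pScan_length {now : Char} :
    ∀ (l : List Char) (bal : Int) (t : List Char),
      pScan now bal l = some t → t.length < l.length := by
  intro l
  induction l with
  | nil => intro bal t h; simp [pScan] at h
  | cons c rest ih =>
    intro bal t h
    rw [pScan] at h
    by_cases hb : ((if c == now then bal + 1 else bal - 1) == 0) = true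
    · rw [if_pos hb] at h
      injection h with h
      subst h
      simp
    · rw [if_neg hb] at h
      exact Nat.lt_trans (ih _ _ h) (by simp)

-- proof-side group counter driven by pScan
def pCount : List Char → Int
  | [] => 0
  | c :: rest =>
    match h : pScan c 0 (c :: rest) with
    | none => 1
    | some tail => 1 + pCount tail
termination_by l => l.length
decreasing_by exact pScan_length _ _ _ h

-- one-step unfolding lemmas
lemma A_nil (result o x : Int) (now : Char) :
    solutionA_loop result o x now [] = if o > 0 ∨ x > 0 then result + 1 else result := rfl

lemma A_cons (result o x : Int) (now c : Char) (rest : List Char) :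
    solutionA_loop result o x now (c :: rest) =
      if ((if c == now then o + 1 else o) == (if c == now then x else x + 1)) then
        solutionA_loop (result + 1) 0 0 (match rest with | [] => now | d :: _ => d) rest
      else
        solutionA_loop result (if c == now then o + 1 else o)
          (if c == now then x else x + 1) now rest := rfl

lemma scan_cons (now : Char) (bal : Int) (c : Char) (rest : List Char) :
    pScan now bal (c :: rest) =
      if ((if c == now then bal + 1 else bal - 1) == 0) then some rest
      else pScan now (if c == now then bal + 1 else bal - 1) rest := rfl

lemma count_cons (c : Char) (rest : List Char) :
    pCount (c :: rest) =
      match pScan c 0 (c :: rest) with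
      | none => 1
      | some tail => 1 + pCount tail := by
  rw [pCount]
  split <;> rename_i h <;> rw [h]

lemma go_cons (c : Char) (rest : List Char) :
    solutionB_go (c :: rest) =
      match PySem.List.index?
          (solutionB_prefix 0 ((c :: rest).map (fun d => if d == c then 1 else -1))) 0 with
      | none => 1
      | some idx =>
        1 + (if ((c :: rest).drop (idx + 1)).isEmpty then 0
             else solutionB_go ((c :: rest).drop (idx + 1))) := by
  rw [solutionB_go]

-- the index of the first zero prefix sum locates exactly pScan's cut
lemma index_prefix_eq_scan (now : Char) :
    ∀ (l : List Char) (bal : Int),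
      (PySem.List.index? (solutionB_prefix bal (l.map (fun d => if d == now then 1 else -1))) 0).map
          (fun idx => l.drop (idx + 1)) = pScan now bal l := by
  intro l
  induction l with
  | nil => intro bal; simp [solutionB_prefix, PySem.List.index?, pScan, List.idxOf?]
  | cons c rest ih =>
    intro bal
    rw [scan_cons]
    have hsum : bal + (if c == now then (1 : Int) else -1) =
        (if c == now then bal + 1 else bal - 1) := by split <;> ring
    simp only [List.map_cons, solutionB_prefix, hsum]
    by_cases hb : ((if c == now then bal + 1 else bal - 1) == 0) = true
    · have hz : (if c == now then bal + 1 else bal - 1) = 0 := by simpa using hb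
      rw [if_pos hb, hz, PySem.List.index?_cons_self]
      simp
    · have hz : (if c == now then bal + 1 else bal - 1) ≠ 0 := by simpa using hb
      rw [if_neg hb, PySem.List.index?_cons_of_ne _ hz]
      rw [← ih (if c == now then bal + 1 else bal - 1)]
      cases PySem.List.index?
          (solutionB_prefix (if c == now then bal + 1 else bal - 1)
            (rest.map (fun d => if d == now then 1 else -1))) 0 with
      | none => rfl
      | some k => simp [List.drop]

-- B's port equals the proof-side counter
lemma go_eq_count : ∀ (n : Nat) (l : List Char), l.length ≤ n → solutionB_go l = pCount l := by
  intro n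
  induction n with
  | zero =>
    intro l hl
    have h0 : l = [] := by cases l <;> simp_all
    subst h0; simp [solutionB_go, pCount]
  | succ n ih =>
    intro l hl
    cases l with
    | nil => simp [solutionB_go, pCount]
    | cons c rest =>
      rw [go_cons, count_cons]
      have h := index_prefix_eq_scan c (c :: rest) 0
      cases hidx : PySem.List.index?
          (solutionB_prefix 0 ((c :: rest).map (fun d => if d == c then 1 else -1))) 0 with
      | none =>
        rw [hidx] at h
        rw [← h]
        simp
      | some idx =>
        rw [hidx] at h
        rw [← h]
        simp only [Option.map_some]
        have hlen : ((c :: rest).drop (idx + 1)).length ≤ n := by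
          simp only [List.length_drop] at *
          simp at hl ⊢
          omega
        rw [ih _ hlen]
        cases htail : (c :: rest).drop (idx + 1) with
        | nil => simp [pCount]
        | cons d t => simp

-- A's loop from state (result, o, x) equals result plus the count of the remainder,
-- for any reachable state (o, x ≥ 0, and o = x only right after a reset).
lemma solutionA_loop_eq :
    ∀ (l : List Char) (now : Char) (o x result : Int),
      0 ≤ o → 0 ≤ x → (o = x → o = 0) →
      solutionA_loop result o x now l =
        result + (if o = 0 ∧ x = 0 ∧ l = [] then 0 else
          match pScan now (o - x) l with
          | none => 1
          | some tail => 1 + pCount tail) := by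
  intro l
  induction l with
  | nil =>
    intro now o x result ho hx hox
    rw [A_nil]
    by_cases h0 : o = 0 ∧ x = 0
    · have h1 : ¬(o > 0 ∨ x > 0) := by omega
      simp [h0.1, h0.2]
    · have h1 : o > 0 ∨ x > 0 := by omega
      have h2 : ¬(o = 0 ∧ x = 0 ∧ ([] : List Char) = []) := by simpa using h0
      rw [if_pos h1, if_neg h2]
      simp [pScan]
  | cons c rest ih =>
    intro now o x result ho hx hox
    rw [A_cons, scan_cons, if_neg (show ¬(o = 0 ∧ x = 0 ∧ c :: rest = []) by simp)]
    by_cases hc : (c == now) = true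
    · by_cases hb : o + 1 = x
      · have h1 : ((if c == now then o + 1 else o) == (if c == now then x else x + 1)) = true := by
          simp [hc]; omega
        have h2 : ((if c == now then o - x + 1 else o - x - 1) == 0) = true := by
          simp [hc]; omega
        rw [if_pos h1, if_pos h2]
        cases rest with
        | nil =>
          rw [A_nil]
          norm_num [pCount]
        | cons d rest' =>
          show solutionA_loop (result + 1) 0 0 d (d :: rest') =
            result + (1 + pCount (d :: rest'))
          rw [ih d 0 0 (result + 1) le_rfl le_rfl (fun _ => rfl),
            if_neg (show ¬((0:Int) = 0 ∧ (0:Int) = 0 ∧ d :: rest' = []) by simp),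
            count_cons]
          simp only [sub_zero]
          cases pScan d 0 (d :: rest') <;> ring
      · have h1 : ¬(((if c == now then o + 1 else o) == (if c == now then x else x + 1)) = true) := by
          simp [hc]; omega
        have h2 : ¬(((if c == now then o - x + 1 else o - x - 1) == 0) = true) := by
          simp [hc]; omega
        rw [if_neg h1, if_neg h2]
        rw [ih now (if c == now then o + 1 else o) (if c == now then x else x + 1) result
          (by simp [hc]; omega) (by simp [hc]; omega) (by simp [hc]; omega)]
        rw [if_neg (show ¬((if c == now then o + 1 else o) = 0 ∧
              (if c == now then x else x + 1) = 0 ∧ rest = []) by simp [hc]; omega)]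
        have : (if c == now then o + 1 else o) - (if c == now then x else x + 1) =
            (if c == now then o - x + 1 else o - x - 1) := by simp [hc]; omega
        rw [this]
    · by_cases hb : o = x + 1
      · have h1 : ((if c == now then o + 1 else o) == (if c == now then x else x + 1)) = true := by
          simp [hc]; omega
        have h2 : ((if c == now then o - x + 1 else o - x - 1) == 0) = true := by
          simp [hc]; omega
        rw [if_pos h1, if_pos h2]
        cases rest with
        | nil =>
          rw [A_nil]
          norm_num [pCount]
        | cons d rest' =>
          show solutionA_loop (result + 1) 0 0 d (d :: rest') =
            result + (1 + pCount (d :: rest'))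
          rw [ih d 0 0 (result + 1) le_rfl le_rfl (fun _ => rfl),
            if_neg (show ¬((0:Int) = 0 ∧ (0:Int) = 0 ∧ d :: rest' = []) by simp),
            count_cons]
          simp only [sub_zero]
          cases pScan d 0 (d :: rest') <;> ring
      · have h1 : ¬(((if c == now then o + 1 else o) == (if c == now then x else x + 1)) = true) := by
          simp [hc]; omega
        have h2 : ¬(((if c == now then o - x + 1 else o - x - 1) == 0) = true) := by
          simp [hc]; omega
        rw [if_neg h1, if_neg h2]
        rw [ih now (if c == now then o + 1 else o) (if c == now then x else x + 1) result
          (by simp [hc]; omega) (by simp [hc]; omega) (by simp [hc]; omega)]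
        rw [if_neg (show ¬((if c == now then o + 1 else o) = 0 ∧
              (if c == now then x else x + 1) = 0 ∧ rest = []) by simp [hc]; omega)]
        have : (if c == now then o + 1 else o) - (if c == now then x else x + 1) =
            (if c == now then o - x + 1 else o - x - 1) := by simp [hc]; omega
        rw [this]

lemma solution_eq_count (c : Char) (rest : List Char) :
    solutionA_loop 0 0 0 c (c :: rest) = pCount (c :: rest) := by
  rw [solutionA_loop_eq (c :: rest) c 0 0 0 le_rfl le_rfl (fun _ => rfl),
    if_neg (show ¬((0:Int) = 0 ∧ (0:Int) = 0 ∧ c :: rest = []) by simp), count_cons]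
  simp only [sub_zero]
  cases pScan c 0 (c :: rest) <;> ring

-- ===== VERDICT (by name: the statement is the Claim_ definition above) =====
theorem solution_spec : Claim_equal_solution := by
  intro s _ hpre
  unfold Spec_solution solution solution_alt
  cases h : s.toList with
  | nil => exact absurd (String.toList_eq_nil_iff.mp h) hpre
  | cons c rest =>
    show solutionA_loop 0 0 0 c (c :: rest) = solutionB_go (c :: rest)
    rw [solution_eq_count c rest, go_eq_count (c :: rest).length _ le_rfl]
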